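-- pv_equiv track=rewrite | github.com/rkmccs6-sketch/parserc_pro1 | src/parsercfc.py | skip_preprocessor_line
-- ===== SOURCE A (Python) =====
-- def skip_preprocessor_line(text, start_idx):
--     i = start_idx
--     length = len(text)
--     while i < length:
--         if text[i] == "\n":
--             if i > 0 and text[i - 1] == "\\":
--                 i += 1
--                 continue
--             return i + 1
--         i += 1
--     return length
-- ===== SOURCE B (Python) =====
-- import re
--
-- _UNESCAPED_NL = re.compile(r'(?<!\\)\n')
--
-- def skip_preprocessor_line(text, start_idx):
--     m = _UNESCAPED_NL.search(text, start_idx)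
--     return m.end() if m else len(text)
-- ===== Notes on version B (the rewrite author's own statement) =====
-- stated objective: idiomatic
-- what changed: Replaces the manual character-by-character while loop (with its continue-based continuation handling) by a single search for a precompiled regex '(?<!\\)\n' (newline not immediately preceded by a backslash), returning m.end() when it matches and len(text) otherwise.
-- intended difference: For negative start_idx in [-len(text), 0) whose tail text[start_idx:] contains a newline, A's Python negative indexing makes it return a non-positive pseudo-index (e.g. -1) and treat every such newline as unescaped, while B searches from position 0 and returns a genuine index past the first unescaped newline, which is the intended value. — e.g. on skip_preprocessor_line("a\nb", -2): A returns -1, B returns 2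
import Mathlib
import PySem

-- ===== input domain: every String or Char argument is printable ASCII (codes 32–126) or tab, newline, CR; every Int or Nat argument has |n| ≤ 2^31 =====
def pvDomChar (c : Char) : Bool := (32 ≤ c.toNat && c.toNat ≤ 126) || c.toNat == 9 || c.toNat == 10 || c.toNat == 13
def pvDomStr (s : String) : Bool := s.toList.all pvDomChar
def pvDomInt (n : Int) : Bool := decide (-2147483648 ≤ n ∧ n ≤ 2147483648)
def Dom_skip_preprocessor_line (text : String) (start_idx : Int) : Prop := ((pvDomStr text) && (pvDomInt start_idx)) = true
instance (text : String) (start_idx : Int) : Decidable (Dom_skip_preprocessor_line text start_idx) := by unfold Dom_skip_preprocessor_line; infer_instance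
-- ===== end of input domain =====

-- B replaces A's manual character-by-character while loop with a single regex-style search
-- for an unescaped newline (idiomatic); equivalence is proved for start_idx ≥ -len(text),
-- with an intended difference D_ on negative start_idx whose tail contains a newline.

-- ===== PORT A =====
-- A's while loop; each iteration does i += 1, so fuel = (len - i).toNat counts the
-- remaining iterations exactly (fuel 0 ↔ i ≥ len, the loop's exit test).
def pvA_loop (cs : List Char) (len : Int) : Nat → Int → Int
  | 0, _ => len
  | fuel + 1, i =>
      match PySem.List.pyGet? cs i with
      | none => 0   -- IndexError (outside Pre_)
      | some c =>
        if c = '\n' then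
          if i > 0 ∧ PySem.List.pyGet? cs (i - 1) = some '\\' then
            pvA_loop cs len fuel (i + 1)
          else i + 1
        else pvA_loop cs len fuel (i + 1)

def skip_preprocessor_line (text : String) (start_idx : Int) : Int :=
  pvA_loop text.toList (text.toList.length : Int)
    (((text.toList.length : Int) - start_idx).toNat) start_idx

-- ===== PORT B =====
-- The regex r'(?<!\\)\n' matches a '\n' not immediately preceded by '\\' (the lookbehind
-- may look before pos).  pattern.search(text, pos) clamps a negative pos to 0 and scans
-- left-to-right for the first match from max(pos,0); ported by hand, exact on all inputs:
-- pair every char with its predecessor and find the first matching index from pos.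
def pvB_pred (pc : Option Char × Char) : Bool := pc.2 == '\n' && pc.1 != some '\\'

def pvB_core (cs : List Char) (pos : Nat) : Int :=
  if pos + List.findIdx pvB_pred ((List.zip (none :: cs.map some) cs).drop pos) < cs.length
  then ((pos + List.findIdx pvB_pred ((List.zip (none :: cs.map some) cs).drop pos) : Nat) : Int) + 1
  else (cs.length : Int)

def skip_preprocessor_line_alt (text : String) (start_idx : Int) : Int :=
  pvB_core text.toList (max start_idx 0).toNat

-- ===== PRECONDITION & SPEC =====
-- Pre_ excludes exactly start_idx < -len(text), where A raises IndexError.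
def Pre_skip_preprocessor_line (text : String) (start_idx : Int) : Prop :=
  -(text.toList.length : Int) ≤ start_idx
instance (text : String) (start_idx : Int) : Decidable (Pre_skip_preprocessor_line text start_idx) := by
  unfold Pre_skip_preprocessor_line; infer_instance

def pvWitness_skip_preprocessor_line : String × Int := ("a\nb", 0)

-- For negative start_idx in [-len(text), 0) whose tail text[start_idx:] contains a newline,
-- A's negative indexing returns a non-positive pseudo-index (treating every such newline as
-- unescaped), while B returns the genuine index past the first unescaped newline, the intended value.
def D_skip_preprocessor_line (text : String) (start_idx : Int) : Prop :=
  start_idx < 0 ∧ -(text.toList.length : Int) ≤ start_idx ∧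
    '\n' ∈ text.toList.drop (((text.toList.length : Int) + start_idx).toNat)
instance (text : String) (start_idx : Int) : Decidable (D_skip_preprocessor_line text start_idx) := by
  unfold D_skip_preprocessor_line; infer_instance

def Spec_skip_preprocessor_line (text : String) (start_idx : Int) (out : Int) : Prop :=
  ¬ D_skip_preprocessor_line text start_idx → out = skip_preprocessor_line_alt text start_idx
instance (text : String) (start_idx : Int) (out : Int) : Decidable (Spec_skip_preprocessor_line text start_idx out) := by
  unfold Spec_skip_preprocessor_line; infer_instance

def pvDiffWitness_skip_preprocessor_line : String × Int := ("a\nb", -2)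
def pvDiffWitnessOut_skip_preprocessor_line : Int × Int := (-1, 2)

-- ===== CLAIM =====
def Claim_unchanged_skip_preprocessor_line : Prop := ∀ (text : String) (start_idx : Int), Dom_skip_preprocessor_line text start_idx → Pre_skip_preprocessor_line text start_idx → Spec_skip_preprocessor_line text start_idx (skip_preprocessor_line text start_idx)
def Claim_changed_skip_preprocessor_line : Prop := Dom_skip_preprocessor_line (pvDiffWitness_skip_preprocessor_line.1) (pvDiffWitness_skip_preprocessor_line.2) ∧ Pre_skip_preprocessor_line (pvDiffWitness_skip_preprocessor_line.1) (pvDiffWitness_skip_preprocessor_line.2) ∧ D_skip_preprocessor_line (pvDiffWitness_skip_preprocessor_line.1) (pvDiffWitness_skip_preprocessor_line.2) ∧ skip_preprocessor_line (pvDiffWitness_skip_preprocessor_line.1) (pvDiffWitness_skip_preprocessor_line.2) = pvDiffWitnessOut_skip_preprocessor_line.1 ∧ skip_preprocessor_line_alt (pvDiffWitness_skip_preprocessor_line.1) (pvDiffWitness_skip_preprocessor_line.2) = pvDiffWitnessOut_skip_preprocessor_line.2 ∧ pvDiffWitnessOut_skip_preprocessor_line.1 ≠ pvDiffWitnessOu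t_skip_preprocessor_line.2
def Claim_exact_skip_preprocessor_line : Prop := ∀ (text : String) (start_idx : Int), Dom_skip_preprocessor_line text start_idx → Pre_skip_preprocessor_line text start_idx → D_skip_preprocessor_line text start_idx → skip_preprocessor_line text start_idx ≠ skip_preprocessor_line_alt text start_idx

-- ===== LEMMAS AND PROOFS =====

-- one unfolding step of A's loop when the indexing succeeds
lemma pvA_step (cs : List Char) (len : Int) (n : Nat) (i : Int) (c : Char)
    (h : PySem.List.pyGet? cs i = some c) :
    pvA_loop cs len (n + 1) i =
      if c = '\n' then
        if i > 0 ∧ PySem.List.pyGet? cs (i - 1) = some '\\' then pvA_loop cs len n (i + 1)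
        else i + 1
      else pvA_loop cs len n (i + 1) := by
  rw [pvA_loop, h]

-- the predecessor component stored at index `pos` of the zipped pair list
def pvPrev (cs : List Char) (pos : Nat) : Option Char := (none :: cs.map some).getD pos none

lemma pvPrev_zero (cs : List Char) : pvPrev cs 0 = none := rfl

lemma pvPrev_succ (cs : List Char) (j : Nat) (h : j < cs.length) :
    pvPrev cs (j + 1) = some cs[j] := by
  unfold pvPrev
  have h1 : j + 1 < (none :: cs.map some).length := by simp; omega
  rw [List.getD_eq_getElem _ _ h1]
  simp

lemma pvPairs_length (cs : List Char) :
    (List.zip (none :: cs.map some) cs).length = cs.length := by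
  simp [List.length_zip]

lemma pvPairs_drop_cons (cs : List Char) (pos : Nat) (h : pos < cs.length) :
    (List.zip (none :: cs.map some) cs).drop pos
      = (pvPrev cs pos, cs[pos]) :: (List.zip (none :: cs.map some) cs).drop (pos + 1) := by
  have hl : pos < (List.zip (none :: cs.map some) cs).length := by
    rw [pvPairs_length]; exact h
  have h1 : pos < (none :: cs.map some).length := by simp; omega
  rw [List.drop_eq_getElem_cons hl]
  congr 1
  rw [List.getElem_zip]
  unfold pvPrev
  rw [List.getD_eq_getElem _ _ h1]

lemma pvB_core_of_le (cs : List Char) (pos : Nat) (h : cs.length ≤ pos) :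
    pvB_core cs pos = (cs.length : Int) := by
  unfold pvB_core
  rw [List.drop_eq_nil_of_le (by rw [pvPairs_length]; exact h)]
  rw [List.findIdx_nil, if_neg (by omega)]

lemma pvB_core_of_hit (cs : List Char) (pos : Nat) (h : pos < cs.length)
    (hp : pvB_pred (pvPrev cs pos, cs[pos]) = true) :
    pvB_core cs pos = (pos : Int) + 1 := by
  unfold pvB_core
  rw [pvPairs_drop_cons cs pos h, List.findIdx_cons, hp]
  simp only [cond_true]
  rw [if_pos (by omega)]
  norm_num

lemma pvB_core_of_miss (cs : List Char) (pos : Nat) (h : pos < cs.length)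
    (hp : pvB_pred (pvPrev cs pos, cs[pos]) = false) :
    pvB_core cs pos = pvB_core cs (pos + 1) := by
  unfold pvB_core
  rw [pvPairs_drop_cons cs pos h, List.findIdx_cons, hp]
  simp only [cond_false]
  have harith : ∀ k : Nat, pos + (k + 1) = (pos + 1) + k := by omega
  rw [harith]

lemma pvB_core_pos (cs : List Char) (pos : Nat) (h : 0 < cs.length) :
    1 ≤ pvB_core cs pos := by
  unfold pvB_core
  split <;> omega

-- main lemma: for a nonnegative start index i, A's loop equals B's search from i
lemma pvAB (cs : List Char) (n : Nat) : ∀ i : Nat, n = cs.length - i →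
    pvA_loop cs (cs.length : Int) n (i : Int) = pvB_core cs i := by
  induction n with
  | zero =>
    intro i hi
    have h : cs.length ≤ i := by omega
    rw [pvB_core_of_le cs i h]
    rfl
  | succ n ih =>
    intro i hi
    have h : i < cs.length := by omega
    have hget : PySem.List.pyGet? cs (i : Int) = some cs[i] := by
      rw [PySem.List.pyGet?_natCast]
      simp [h]
    have hih := ih (i + 1) (by omega)
    rw [pvA_step cs _ n (i : Int) cs[i] hget]
    have hstep : (i : Int) + 1 = ((i + 1 : Nat) : Int) := by push_cast; ring
    rw [hstep]
    cases i with
    | zero =>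
      by_cases hnl : cs[0] = '\n'
      · rw [if_pos hnl, if_neg (by rintro ⟨h1, -⟩; omega)]
        exact_mod_cast (pvB_core_of_hit cs 0 h (by simp [pvB_pred, pvPrev_zero, hnl])).symm
      · rw [if_neg hnl, hih, pvB_core_of_miss cs 0 h (by simp [pvB_pred, hnl])]
    | succ j =>
      have hj : j < cs.length := by omega
      have hgetj : PySem.List.pyGet? cs (((j + 1 : Nat) : Int) - 1) = some cs[j] := by
        have e : ((j + 1 : Nat) : Int) - 1 = ((j : Nat) : Int) := by push_cast; ring
        rw [e, PySem.List.pyGet?_natCast]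
        simp [hj]
      by_cases hnl : cs[j + 1] = '\n'
      · rw [if_pos hnl]
        by_cases hbs : cs[j] = '\\'
        · rw [if_pos ⟨by omega, by rw [hgetj, hbs]⟩, hih,
            pvB_core_of_miss cs (j + 1) h (by simp [pvB_pred, pvPrev_succ cs j hj, hbs])]
        · rw [if_neg (by rintro ⟨-, h2⟩; rw [hgetj] at h2; exact hbs (Option.some.inj h2))]
          exact_mod_cast (pvB_core_of_hit cs (j + 1) h
            (by simp [pvB_pred, pvPrev_succ cs j hj, hnl, hbs])).symm
      · rw [if_neg hnl, hih, pvB_core_of_miss cs (j + 1) h (by simp [pvB_pred, hnl])]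

-- negative region, no newline in the tail: A's loop walks the tail and lands at index 0
lemma pvA_neg (cs : List Char) : ∀ m : Nat, 0 < m → m ≤ cs.length →
    (∀ c ∈ cs.drop (cs.length - m), c ≠ '\n') →
    pvA_loop cs (cs.length : Int) (cs.length + m) (-(m : Int))
      = pvA_loop cs (cs.length : Int) cs.length 0 := by
  intro m
  induction m with
  | zero => omega
  | succ m' ih =>
    intro _ hle hno
    have hk : cs.length - (m' + 1) < cs.length := by omega
    have hget : PySem.List.pyGet? cs (-((m' + 1 : Nat) : Int)) = some cs[cs.length - (m' + 1)] := by
      rw [PySem.List.pyGet?_neg_natCast cs (m' + 1) (by omega) hle]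
      rw [List.getElem?_eq_getElem hk]
    have hmem : cs[cs.length - (m' + 1)] ∈ cs.drop (cs.length - (m' + 1)) := by
      rw [List.drop_eq_getElem_cons hk]; exact List.mem_cons_self
    have hnl : cs[cs.length - (m' + 1)] ≠ '\n' := hno _ hmem
    have hfuel : cs.length + (m' + 1) = (cs.length + m') + 1 := by omega
    rw [hfuel, pvA_step cs _ _ _ _ hget, if_neg hnl]
    have hnext : -((m' + 1 : Nat) : Int) + 1 = -((m' : Nat) : Int) := by push_cast; ring
    rw [hnext]
    rcases Nat.eq_zero_or_pos m' with hm0 | hm0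
    · subst hm0; norm_num
    · apply ih hm0 (by omega)
      intro c hc
      apply hno
      have hdd : cs.drop (cs.length - m')
          = cs.drop ((cs.length - (m' + 1)) + ((cs.length - m') - (cs.length - (m' + 1)))) := by
        congr 1; omega
      rw [hdd, ← List.drop_drop] at hc
      exact List.drop_subset _ _ hc

-- negative region, a newline in the tail: A returns a non-positive value
lemma pvA_neg_le (cs : List Char) : ∀ m : Nat, 0 < m → m ≤ cs.length →
    '\n' ∈ cs.drop (cs.length - m) →
    pvA_loop cs (cs.length : Int) (cs.length + m) (-(m : Int)) ≤ 0 := by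
  intro m
  induction m with
  | zero => omega
  | succ m' ih =>
    intro _ hle hmem
    have hk : cs.length - (m' + 1) < cs.length := by omega
    have hget : PySem.List.pyGet? cs (-((m' + 1 : Nat) : Int)) = some cs[cs.length - (m' + 1)] := by
      rw [PySem.List.pyGet?_neg_natCast cs (m' + 1) (by omega) hle]
      rw [List.getElem?_eq_getElem hk]
    have hfuel : cs.length + (m' + 1) = (cs.length + m') + 1 := by omega
    rw [hfuel, pvA_step cs _ _ _ _ hget]
    by_cases hnl : cs[cs.length - (m' + 1)] = '\n'
    · rw [if_pos hnl, if_neg (by rintro ⟨h1, -⟩; omega)]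
      omega
    · rw [if_neg hnl]
      have hnext : -((m' + 1 : Nat) : Int) + 1 = -((m' : Nat) : Int) := by push_cast; ring
      rw [hnext]
      rw [List.drop_eq_getElem_cons hk] at hmem
      have e : cs.length - (m' + 1) + 1 = cs.length - m' := by omega
      rw [e] at hmem
      rcases List.mem_cons.mp hmem with hh | hh
      · exact absurd hh.symm hnl
      · rcases Nat.eq_zero_or_pos m' with hm0 | hm0
        · subst hm0; simp at hh
        · exact ih hm0 (by omega) hh

-- ===== VERDICT =====
theorem skip_preprocessor_line_spec : Claim_unchanged_skip_preprocessor_line := by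
  intro text s _ hpre hnd
  unfold Pre_skip_preprocessor_line at hpre
  unfold D_skip_preprocessor_line at hnd
  unfold skip_preprocessor_line skip_preprocessor_line_alt
  by_cases hs : 0 ≤ s
  · obtain ⟨n, rfl⟩ : ∃ n : Nat, s = (n : Int) := ⟨s.toNat, (Int.toNat_of_nonneg hs).symm⟩
    have hmax : max ((n : Nat) : Int) 0 = ((n : Nat) : Int) := by omega
    have hfuel : ((text.toList.length : Int) - (n : Int)).toNat = text.toList.length - n := by
      omega
    rw [hmax, hfuel]
    simp only [Int.toNat_natCast]
    exact pvAB text.toList (text.toList.length - n) n rfl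
  · obtain ⟨m, rfl⟩ : ∃ m : Nat, s = -(m : Int) := ⟨(-s).toNat, by omega⟩
    have hm0 : 0 < m := by omega
    have hmlen : m ≤ text.toList.length := by omega
    have hno : ∀ c ∈ text.toList.drop (text.toList.length - m), c ≠ '\n' := by
      intro c hc hceq
      apply hnd
      refine ⟨by omega, hpre, ?_⟩
      have hconv : ((text.toList.length : Int) + -(m : Int)).toNat = text.toList.length - m := by
        omega
      rw [hconv, ← hceq]
      exact hc
    have hmax : (max (-(m : Int)) 0).toNat = 0 := by omega
    have hfuel : ((text.toList.length : Int) - -(m : Int)).toNat = text.toList.length + m := by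
      omega
    rw [hmax, hfuel, pvA_neg text.toList m hm0 hmlen hno]
    exact pvAB text.toList text.toList.length 0 (by omega)

theorem skip_preprocessor_line_changed : Claim_changed_skip_preprocessor_line := by
  unfold Claim_changed_skip_preprocessor_line; decide

theorem skip_preprocessor_line_tight : Claim_exact_skip_preprocessor_line := by
  intro text s _ _ hD
  obtain ⟨hs, hpre, hmem⟩ := hD
  unfold skip_preprocessor_line skip_preprocessor_line_alt
  obtain ⟨m, rfl⟩ : ∃ m : Nat, s = -(m : Int) := ⟨(-s).toNat, by omega⟩
  have hm0 : 0 < m := by omega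
  have hmlen : m ≤ text.toList.length := by omega
  have hconv : ((text.toList.length : Int) + -(m : Int)).toNat = text.toList.length - m := by
    omega
  rw [hconv] at hmem
  have hlen0 : 0 < text.toList.length := by omega
  have hfuel : ((text.toList.length : Int) - -(m : Int)).toNat = text.toList.length + m := by
    omega
  have hA : pvA_loop text.toList (text.toList.length : Int)
      (((text.toList.length : Int) - -(m : Int)).toNat) (-(m : Int)) ≤ 0 := by
    rw [hfuel]
    exact pvA_neg_le text.toList m hm0 hmlen hmem
  have hB : 1 ≤ pvB_core text.toList (max (-(m : Int)) 0).toNat :=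
    pvB_core_pos text.toList _ hlen0
  omega
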